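-- pv_equiv track=rewrite | github.com/combra-lab/pop-spiking-deep-rl | loihi_realization/utility.py | combine_multiple_into_one_int
-- ===== SOURCE A (Python) =====
-- def combine_multiple_into_one_int(input_list, num_bits=7, overall_bits=28):
--     """
--     Combine multiple integers into one integer to save space
--     :param input_list: list of input integers
--     :param num_bits: max number of bits for item in input list
--     :param overall_bits: overall bits of one integer
--     :return: encode_list
--     """
--     int_per_int_num = overall_bits // num_bits
--     assert (len(input_list) % int_per_int_num) == 0
--     encode_list = []
--     encode_list_num = len(input_list) // int_per_int_num
--     for num in range(encode_list_num):
--         start_num = num * int_per_int_num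
--         end_num = (num + 1) * int_per_int_num
--         big_int = 0
--         for i, small_int in enumerate(input_list[start_num:end_num], 0):
--             big_int = big_int + (small_int << (i * num_bits))
--         encode_list.append(big_int)
--     return encode_list
-- ===== SOURCE B (Python) =====
-- def combine_multiple_into_one_int(input_list, num_bits=7, overall_bits=28):
--     """Column-wise packing: allocate the whole output as zeros, then for each
--     digit position i sweep once over all chunks, adding that position's
--     contribution into every output slot (transposed loop order vs per-chunk
--     accumulation)."""
--     int_per_int_num = overall_bits // num_bits
--     assert (len(input_list) % int_per_int_num) == 0
--     encode_list_num = len(input_list) // int_per_int_num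
--     encode_list = [0] * encode_list_num
--     for i in range(int_per_int_num):
--         shift = i * num_bits
--         for j in range(encode_list_num):
--             encode_list[j] += input_list[j * int_per_int_num + i] << shift
--     return encode_list
-- ===== Notes on version B (the rewrite author's own statement) =====
-- stated objective: alternative
-- what changed: Replaces per-chunk slice-and-accumulate with a transposed, column-wise scheme: the output list of zeros is allocated up front and, for each digit position i, one pass over all chunks adds input[j*k+i] << (i*num_bits) into encode_list[j]; there is no chunk slicing and no per-chunk accumulator.
import Mathlib
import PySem

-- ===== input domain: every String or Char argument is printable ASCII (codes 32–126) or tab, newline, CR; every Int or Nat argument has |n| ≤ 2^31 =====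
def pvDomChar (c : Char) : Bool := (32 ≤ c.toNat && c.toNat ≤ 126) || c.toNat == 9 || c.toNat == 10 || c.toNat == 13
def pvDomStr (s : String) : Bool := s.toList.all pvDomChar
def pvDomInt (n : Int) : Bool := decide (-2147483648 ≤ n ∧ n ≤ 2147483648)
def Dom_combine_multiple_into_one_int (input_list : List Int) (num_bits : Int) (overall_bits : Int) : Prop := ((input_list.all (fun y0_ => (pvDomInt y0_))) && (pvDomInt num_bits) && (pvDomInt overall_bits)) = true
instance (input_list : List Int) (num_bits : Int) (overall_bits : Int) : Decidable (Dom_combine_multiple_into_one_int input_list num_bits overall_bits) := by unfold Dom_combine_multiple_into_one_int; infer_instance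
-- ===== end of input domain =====

-- B packs column-wise: it allocates the zero output list up front and, per digit position, sweeps once over all chunks adding that position's contribution in place (alternative decomposition; same cost).

-- ===== PORT A =====
-- Python '<<' is Lean's '<<<' on Int; Pre_ guarantees every shift amount actually used is nonnegative, as Python requires.
def combine_multiple_into_one_int (input_list : List Int) (num_bits : Int) (overall_bits : Int) : List Int :=
  let int_per_int_num := PySem.Int.floordiv overall_bits num_bits
  let encode_list_num := PySem.Int.floordiv (input_list.length : Int) int_per_int_num
  (PySem.List.pyRange 0 encode_list_num 1).foldl (fun (encode_list : List Int) num =>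
    let start_num := num * int_per_int_num
    let end_num := (num + 1) * int_per_int_num
    let big_int := (PySem.List.enumerate (PySem.List.slice input_list (some start_num) (some end_num)) 0).foldl
      (fun (big_int : Int) p => big_int + (p.2 <<< (p.1 * num_bits))) 0
    encode_list ++ [big_int]) []

-- ===== PORT B =====
-- '[0] * n' is List.replicate n.toNat 0 (Python's negative repeat count gives []); 'encode_list[j] += v'
-- is a pyGetD/pySetD pair at index j, always in range here (0 ≤ j < len(encode_list) under Pre_).
def combine_multiple_into_one_int_alt (input_list : List Int) (num_bits : Int) (overall_bits : Int) : List Int :=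
  let int_per_int_num := PySem.Int.floordiv overall_bits num_bits
  let encode_list_num := PySem.Int.floordiv (input_list.length : Int) int_per_int_num
  (PySem.List.pyRange 0 int_per_int_num 1).foldl (fun (encode_list : List Int) i =>
    let shift := i * num_bits
    (PySem.List.pyRange 0 encode_list_num 1).foldl (fun (encode_list : List Int) j =>
      PySem.List.pySetD encode_list j
        (PySem.List.pyGetD encode_list j 0 +
          (PySem.List.pyGetD input_list (j * int_per_int_num + i) 0) <<< shift)) encode_list)
    (List.replicate encode_list_num.toNat 0)

-- ===== PRECONDITION & SPEC =====
-- Pre_ admits exactly the inputs on which the Python A returns: it excludes only inputs where A raises —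
-- ZeroDivisionError (num_bits = 0 or chunk size 0), AssertionError (chunk size does not divide the length),
-- and ValueError on a negative shift (num_bits < 0 with chunk size ≥ 2 and a nonempty loop).
def Pre_combine_multiple_into_one_int (input_list : List Int) (num_bits : Int) (overall_bits : Int) : Prop :=
  num_bits ≠ 0 ∧ PySem.Int.floordiv overall_bits num_bits ≠ 0 ∧
    PySem.Int.mod (input_list.length : Int) (PySem.Int.floordiv overall_bits num_bits) = 0 ∧
    (0 < num_bits ∨ PySem.Int.floordiv overall_bits num_bits = 1 ∨
      PySem.Int.floordiv (input_list.length : Int) (PySem.Int.floordiv overall_bits num_bits) ≤ 0)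
instance (input_list : List Int) (num_bits : Int) (overall_bits : Int) : Decidable (Pre_combine_multiple_into_one_int input_list num_bits overall_bits) := by unfold Pre_combine_multiple_into_one_int; infer_instance
def pvWitness_combine_multiple_into_one_int : List Int × Int × Int := ([3, 5, 1, 2], 7, 14)

def Spec_combine_multiple_into_one_int (input_list : List Int) (num_bits : Int) (overall_bits : Int) (out : List Int) : Prop := out = combine_multiple_into_one_int_alt input_list num_bits overall_bits
instance (input_list : List Int) (num_bits : Int) (overall_bits : Int) (out : List Int) : Decidable (Spec_combine_multiple_into_one_int input_list num_bits overall_bits out) := by unfold Spec_combine_multiple_into_one_int; infer_instance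

-- ===== CLAIM (what is proved, stated in full; the proofs are below) =====
def Claim_equal_combine_multiple_into_one_int : Prop := ∀ (input_list : List Int) (num_bits : Int) (overall_bits : Int), Dom_combine_multiple_into_one_int input_list num_bits overall_bits → Pre_combine_multiple_into_one_int input_list num_bits overall_bits → Spec_combine_multiple_into_one_int input_list num_bits overall_bits (combine_multiple_into_one_int input_list num_bits overall_bits)

-- ===== LEMMAS AND PROOFS =====

-- One cell's contribution: element i of chunk j, shifted to its digit position.
def pvCell (xs : List Int) (w : Int) (k j i : Nat) : Int := (xs.getD (j * k + i) 0) <<< ((i : Int) * w)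

-- The value of output slot j after the first c digit positions have been added in.
def pvRow (xs : List Int) (w : Int) (k c j : Nat) : Int := ((List.range c).map (pvCell xs w k j)).sum

-- A's enumerate fold over a chunk is the sum of shifted cells.
theorem pv_enum_fold (w : Int) (c : List Int) : ∀ (i0 : Nat) (acc : Int),
    (PySem.List.enumerate c (i0 : Int)).foldl (fun b p => b + (p.2 <<< (p.1 * w))) acc
      = acc + ((List.range c.length).map (fun t => c.getD t 0 <<< (((i0 + t : Nat) : Int) * w))).sum := by
  induction c with
  | nil => intro i0 acc; simp [PySem.List.enumerate_nil]
  | cons a c ih =>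
    intro i0 acc
    rw [PySem.List.enumerate_cons, List.foldl_cons]
    have hcast : ((i0 : Int) + 1) = ((i0 + 1 : Nat) : Int) := by push_cast; ring
    rw [hcast, ih (i0 + 1)]
    simp only [List.length_cons, List.range_succ_eq_map, List.map_cons, List.map_map, List.sum_cons]
    have hfun : ∀ t : Nat, ((fun t => (a :: c).getD t 0 <<< (((i0 + t : Nat) : Int) * w)) ∘ Nat.succ) t
        = c.getD t 0 <<< (((i0 + 1 + t : Nat) : Int) * w) := by
      intro t
      simp only [Function.comp_apply, Nat.succ_eq_add_one, List.getD_cons_succ]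
      congr 2
      omega
    rw [List.map_congr_left (fun t _ => hfun t)]
    simp only [Nat.add_zero, List.getD_cons_zero]
    ring

-- Reading slot m of a range-map list.
theorem pv_getD_map_range (n' : Nat) (f : Nat → Int) (m : Nat) (h : m < n') :
    ((List.range n').map f).getD m 0 = f m := by
  simp [List.getD_eq_getElem?_getD, h]

-- Writing slot m of a range-map list.
theorem pv_set_map_range (n' : Nat) (f : Nat → Int) (m : Nat) (v : Int) :
    ((List.range n').map f).set m v = (List.range n').map (fun j => if j = m then v else f j) := by
  apply List.ext_getElem
  · simp
  · intro j h1 h2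
    simp only [List.getElem_set, List.getElem_map, List.getElem_range]
    split_ifs <;> first | rfl | omega

-- One column pass over the first m slots of a range-map state.
theorem pv_pass (n' : Nat) (g a : Nat → Int) : ∀ m, m ≤ n' →
    (List.range m).foldl (fun e j => e.set j (e.getD j 0 + a j)) ((List.range n').map g)
      = (List.range n').map (fun j => if j < m then g j + a j else g j) := by
  intro m
  induction m with
  | zero =>
    intro _
    simp
  | succ m ih =>
    intro hm
    rw [List.range_succ, List.foldl_append, ih (by omega), List.foldl_cons, List.foldl_nil]
    rw [pv_getD_map_range n' _ m (by omega)]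
    simp only [lt_irrefl, if_false]
    rw [pv_set_map_range]
    apply List.map_congr_left
    intro j _
    by_cases hjm : j = m
    · subst hjm; simp
    · have hlt : (j < m + 1) ↔ (j < m) := by omega
      simp [hjm, hlt]

-- A full column pass adds a j to every slot.
theorem pv_pass_full (n' : Nat) (g a : Nat → Int) :
    (List.range n').foldl (fun e j => e.set j (e.getD j 0 + a j)) ((List.range n').map g)
      = (List.range n').map (fun j => g j + a j) := by
  rw [pv_pass n' g a n' le_rfl]
  apply List.map_congr_left
  intro j hj
  rw [if_pos (List.mem_range.mp hj)]

-- B's outer loop: after the first m digit positions, slot j holds pvRow … m j.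
theorem pv_outer (xs : List Int) (w : Int) (k' n' : Nat) : ∀ m : Nat,
    (List.range m).foldl
        (fun e i => (List.range n').foldl (fun e2 j => e2.set j (e2.getD j 0 + pvCell xs w k' j i)) e)
        ((List.range n').map (fun j => pvRow xs w k' 0 j))
      = (List.range n').map (pvRow xs w k' m) := by
  intro m
  induction m with
  | zero => simp
  | succ m ih =>
    rw [List.range_succ, List.foldl_append, ih, List.foldl_cons, List.foldl_nil]
    rw [pv_pass_full n' (pvRow xs w k' m) (fun j => pvCell xs w k' j m)]
    apply List.map_congr_left
    intro j _
    simp [pvRow, List.range_succ]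

-- A's chunk value is the fully accumulated row.
theorem pv_chunk_row (xs : List Int) (w : Int) (k' n' j : Nat)
    (hlen : xs.length = n' * k') (hj : j < n') :
    (PySem.List.enumerate (PySem.List.slice xs (some ((j : Int) * (k' : Int))) (some (((j : Int) + 1) * (k' : Int)))) 0).foldl
        (fun b p => b + (p.2 <<< (p.1 * w))) 0
      = pvRow xs w k' k' j := by
  have h1 : ((j : Int) * (k' : Int)) = ((j * k' : Nat) : Int) := by push_cast; ring
  have h2 : (((j : Int) + 1) * (k' : Int)) = (((j + 1) * k' : Nat) : Int) := by push_cast; ring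
  rw [h1, h2, PySem.List.slice_natCast]
  have hexp : (j + 1) * k' = j * k' + k' := by ring
  have hle : (j + 1) * k' ≤ n' * k' := Nat.mul_le_mul (Nat.succ_le_of_lt hj) le_rfl
  have hdrop : (j + 1) * k' - j * k' = k' := by omega
  rw [hdrop]
  have h := pv_enum_fold w ((xs.drop (j * k')).take k') 0 0
  simp only [Nat.cast_zero, zero_add] at h
  rw [h]
  have hlen2 : ((xs.drop (j * k')).take k').length = k' := by
    simp [List.length_take, List.length_drop, hlen]
    omega
  rw [hlen2, pvRow]
  apply congrArg
  apply List.map_congr_left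
  intro t ht
  have ht' : t < k' := List.mem_range.mp ht
  have hget : ((xs.drop (j * k')).take k')[t]? = xs[j * k' + t]? := by
    simp [List.getElem?_drop, ht']
  simp [pvCell, List.getD_eq_getElem?_getD, hget]

-- ===== VERDICT (by name: the statement is the Claim_ definition above) =====
theorem combine_multiple_into_one_int_spec : Claim_equal_combine_multiple_into_one_int := by
  intro xs w ob _hdom hpre
  obtain ⟨hw0, hk0, hmod, _hdisj⟩ := hpre
  clear _hdisj
  unfold Spec_combine_multiple_into_one_int combine_multiple_into_one_int combine_multiple_into_one_int_alt
  simp only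
  have hlen : PySem.Int.floordiv (xs.length : Int) (PySem.Int.floordiv ob w) * (PySem.Int.floordiv ob w)
      = (xs.length : Int) := by
    have h := PySem.Int.floordiv_mul_add_mod (xs.length : Int) (PySem.Int.floordiv ob w)
    rw [hmod] at h
    omega
  generalize hkdef : PySem.Int.floordiv ob w = k at hk0 hmod hlen ⊢
  generalize hndef : PySem.Int.floordiv ((xs.length : Nat) : Int) k = n at hlen ⊢
  clear hkdef hndef hmod
  by_cases hnpos : 0 < n
  · -- main case: n chunks, k ≥ 1 columns
    have hkpos : 0 < k := by
      rcases lt_trichotomy k 0 with h | h | h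
      · exfalso
        have hlt : n * k < 0 := mul_neg_of_pos_of_neg hnpos h
        rw [hlen] at hlt
        omega
      · exact absurd h hk0
      · exact h
    obtain ⟨n', rfl⟩ : ∃ n' : Nat, n = (n' : Int) := ⟨n.toNat, (Int.toNat_of_nonneg (le_of_lt hnpos)).symm⟩
    obtain ⟨k', rfl⟩ : ∃ k' : Nat, k = (k' : Int) := ⟨k.toNat, (Int.toNat_of_nonneg (le_of_lt hkpos)).symm⟩
    have hlen' : xs.length = n' * k' := by exact_mod_cast hlen.symm
    have hrepl : List.replicate ((n' : Int)).toNat (0 : Int)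
        = (List.range n').map (fun j => pvRow xs w k' 0 j) := by
      simp [pvRow, List.map_const']
    have hstep : ∀ (e : List Int) (i : Nat),
        List.foldl (fun (e2 : List Int) (j : Nat) => PySem.List.pySetD e2 (j : Int)
            (PySem.List.pyGetD e2 (j : Int) 0 +
              (PySem.List.pyGetD xs ((j : Int) * (k' : Int) + (i : Int)) 0) <<< ((i : Int) * w))) e (List.range n')
          = List.foldl (fun (e2 : List Int) (j : Nat) => e2.set j (e2.getD j 0 + pvCell xs w k' j i)) e (List.range n') := by
      intro e i
      have hfun : (fun (e2 : List Int) (j : Nat) => PySem.List.pySetD e2 (j : Int)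
            (PySem.List.pyGetD e2 (j : Int) 0 +
              (PySem.List.pyGetD xs ((j : Int) * (k' : Int) + (i : Int)) 0) <<< ((i : Int) * w)))
          = fun (e2 : List Int) (j : Nat) => e2.set j (e2.getD j 0 + pvCell xs w k' j i) := by
        funext e2 j
        have hidx : ((j : Int) * (k' : Int) + (i : Int)) = ((j * k' + i : Nat) : Int) := by push_cast; ring
        rw [hidx, PySem.List.pySetD_natCast, PySem.List.pyGetD_natCast, PySem.List.pyGetD_natCast, pvCell]
      rw [hfun]
    simp only [PySem.List.pyRange_zero_natCast, List.foldl_map]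
    rw [PySem.List.foldl_append_singleton_eq_map, List.nil_append, hrepl]
    simp only [hstep]
    rw [pv_outer xs w k' n' k']
    apply List.map_congr_left
    intro j hj
    exact pv_chunk_row xs w k' n' j hlen' (List.mem_range.mp hj)
  · -- degenerate case: no chunks; both sides return []
    rw [not_lt] at hnpos
    have hnil : PySem.List.pyRange 0 n 1 = [] := PySem.List.pyRange_one_eq_nil hnpos
    have hrepl : List.replicate n.toNat (0 : Int) = [] := by
      have h0 : n.toNat = 0 := Int.toNat_eq_zero.mpr hnpos
      rw [h0]
      rfl
    rw [hnil, hrepl]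
    simp only [List.foldl_nil]
    rw [List.foldl_fixed]
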